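-- pv_equiv track=rewrite | github.com/Sayan-404/pokerEconomics | tmp.py | find_repeated_sequences
-- ===== SOURCE A (Python) =====
-- def find_repeated_sequences(arr):
--     if not arr:
--         return []
--
--     repeated_sequences = []
--     current_sequence = [arr[0]]
--
--     for i in range(1, len(arr)):
--         if arr[i] == arr[i - 1]:
--             current_sequence.append(arr[i])
--         else:
--             if len(current_sequence) > 1:
--                 repeated_sequences.append(current_sequence)
--             current_sequence = [arr[i]]
--
--     # Final check to add the last sequence if it's a repeated one
--     if len(current_sequence) > 1:
--         repeated_sequences.append(current_sequence)
--
--     return repeated_sequences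
-- ===== SOURCE B (Python) =====
-- def find_repeated_sequences(arr):
--     res = []
--     i = 0
--     n = len(arr)
--     while i < n:
--         j = i
--         while j < n and arr[j] == arr[i]:
--             j += 1
--         if j - i > 1:
--             res.append(arr[i:j])
--         i = j
--     return res
-- ===== Notes on version B (the rewrite author's own statement) =====
-- stated objective: alternative
-- what changed: Replaces the element-by-element loop with a growing current_sequence accumulator and a duplicated tail flush by a two-pointer run scanner: an inner scan finds the end of each run of equal elements and the run is emitted as one slice, with no accumulator and no final check.
import Mathlib
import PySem

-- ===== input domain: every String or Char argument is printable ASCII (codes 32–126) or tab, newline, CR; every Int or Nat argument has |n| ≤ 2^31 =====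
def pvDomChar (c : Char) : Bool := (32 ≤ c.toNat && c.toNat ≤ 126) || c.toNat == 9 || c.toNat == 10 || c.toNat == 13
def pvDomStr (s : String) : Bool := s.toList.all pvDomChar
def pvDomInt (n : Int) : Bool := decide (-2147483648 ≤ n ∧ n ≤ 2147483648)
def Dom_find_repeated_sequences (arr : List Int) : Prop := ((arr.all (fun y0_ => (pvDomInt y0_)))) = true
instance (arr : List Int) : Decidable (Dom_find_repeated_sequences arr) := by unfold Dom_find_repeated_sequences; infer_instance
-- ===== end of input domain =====

-- B replaces A's element-by-element accumulator loop (with its duplicated tail flush)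
-- by a two-pointer run scanner; equal return values proved on all inputs.

-- ===== PORT A =====
-- loop body of A's 'for i in range(1, len(arr))' (state = (repeated_sequences, current_sequence))
def bodyA (arr : List Int) (st : List (List Int) × List Int) (i : Int) :
    List (List Int) × List Int :=
  if PySem.List.pyGetD arr i 0 = PySem.List.pyGetD arr (i - 1) 0 then
    (st.1, st.2 ++ [PySem.List.pyGetD arr i 0])
  else
    (if st.2.length > 1 then st.1 ++ [st.2] else st.1, [PySem.List.pyGetD arr i 0])

def find_repeated_sequences (arr : List Int) : List (List Int) :=
  match arr with
  | [] => []
  | a0 :: _ =>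
    let st := (PySem.List.pyRange 1 (PySem.List.len arr) 1).foldl (bodyA arr) ([], [a0])
    if st.2.length > 1 then st.1 ++ [st.2] else st.1

-- ===== PORT B =====
-- outer while-loop of B: each step consumes one maximal run arr[i:j]
-- (the inner 'while j < n and arr[j] == arr[i]' scan is the takeWhile/dropWhile split)
def altRuns : List Int → List (List Int)
  | [] => []
  | x :: xs =>
    let run := x :: xs.takeWhile (· == x)
    let rest := xs.dropWhile (· == x)
    if run.length > 1 then run :: altRuns rest else altRuns rest
termination_by l => l.length
decreasing_by
  all_goals
    have := List.length_dropWhile_le (· == x) xs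
    simp only [List.length_cons]
    omega

def find_repeated_sequences_alt (arr : List Int) : List (List Int) :=
  altRuns arr

-- ===== PRECONDITION & SPEC =====
def Spec_find_repeated_sequences (arr : List Int) (out : List (List Int)) : Prop := out = find_repeated_sequences_alt arr
instance (arr : List Int) (out : List (List Int)) : Decidable (Spec_find_repeated_sequences arr out) := by unfold Spec_find_repeated_sequences; infer_instance

-- ===== CLAIM (what is proved, stated in full; the proofs are below) =====
def Claim_equal_find_repeated_sequences : Prop := ∀ (arr : List Int), Dom_find_repeated_sequences arr → Spec_find_repeated_sequences arr (find_repeated_sequences arr)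

-- ===== LEMMAS AND PROOFS =====

-- A's loop re-read structurally: prev is the element at index i-1
def loopA : List Int → Int → List (List Int) × List Int → List (List Int) × List Int
  | [], _, st => st
  | x :: xs, prev, st =>
      loopA xs x (if x = prev then (st.1, st.2 ++ [x])
                  else (if st.2.length > 1 then st.1 ++ [st.2] else st.1, [x]))

-- A's final flush of current_sequence
def flushA (st : List (List Int) × List Int) : List (List Int) :=
  if st.2.length > 1 then st.1 ++ [st.2] else st.1

@[simp] lemma altRuns_nil : altRuns [] = [] := by rw [altRuns.eq_def]

lemma altRuns_cons (x : Int) (xs : List Int) :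
    altRuns (x :: xs) = if (x :: xs.takeWhile (· == x)).length > 1
      then (x :: xs.takeWhile (· == x)) :: altRuns (xs.dropWhile (· == x))
      else altRuns (xs.dropWhile (· == x)) := by rw [altRuns.eq_def]

lemma fold_eq_loopA (arr : List Int) :
    ∀ (suf pre : List Int) (hpre : pre ≠ []) (st : List (List Int) × List Int),
      arr = pre ++ suf →
      (PySem.List.pyRange (pre.length : Int) (arr.length : Int) 1).foldl (bodyA arr) st
        = loopA suf (pre.getLast hpre) st := by
  intro suf
  induction suf with
  | nil =>
    intro pre hpre st harr
    subst harr
    rw [PySem.List.pyRange_one_eq_nil (by simp)]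
    rfl
  | cons x rest ih =>
    intro pre hpre st harr
    have hnat : pre.length < (pre ++ x :: rest).length := by
      rw [List.length_append, List.length_cons]; omega
    have hlt : (pre.length : Int) < ((pre ++ x :: rest).length : Int) := by
      exact_mod_cast hnat
    subst harr
    rw [PySem.List.pyRange_one_cons hlt, List.foldl_cons]
    have hx : PySem.List.pyGetD (pre ++ x :: rest) (pre.length : Int) 0 = x := by
      simp [PySem.List.pyGetD_natCast, List.getD]
    have hlen : 1 ≤ pre.length := List.length_pos_iff.mpr hpre
    have hcast : ((pre.length : Int) - 1) = ((pre.length - 1 : Nat) : Int) := by omega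
    have hprev : PySem.List.pyGetD (pre ++ x :: rest) ((pre.length : Int) - 1) 0
        = pre.getLast hpre := by
      rw [hcast, PySem.List.pyGetD_natCast]
      have h1 : pre.length - 1 < pre.length := by omega
      rw [List.getD, List.getElem?_append_left h1, List.getElem?_eq_getElem h1]
      simp [List.getLast_eq_getElem]
    have hstep : bodyA (pre ++ x :: rest) st (pre.length : Int)
        = (if x = pre.getLast hpre then (st.1, st.2 ++ [x])
           else (if st.2.length > 1 then st.1 ++ [st.2] else st.1, [x])) := by
      simp only [bodyA, hx, hprev]
    rw [hstep]
    have harr2 : pre ++ x :: rest = (pre ++ [x]) ++ rest := by simp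
    have hlast : (pre ++ [x]).getLast (by simp) = x := by
      simp
    have h := ih (pre ++ [x]) (by simp)
      (if x = pre.getLast hpre then (st.1, st.2 ++ [x])
       else (if st.2.length > 1 then st.1 ++ [st.2] else st.1, [x])) harr2
    rw [hlast] at h
    rw [show ((pre.length : Int) + 1) = (((pre ++ [x]).length : Nat) : Int) by simp]
    exact h

lemma takeWhile_replicate_append (prev : Int) (t : List Int) :
    ∀ k, (List.replicate k prev ++ t).takeWhile (· == prev)
      = List.replicate k prev ++ t.takeWhile (· == prev) := by
  intro k
  induction k with
  | zero => simp
  | succ k ih => simp [List.replicate_succ, ih]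

lemma dropWhile_replicate_append (prev : Int) (t : List Int) :
    ∀ k, (List.replicate k prev ++ t).dropWhile (· == prev) = t.dropWhile (· == prev) := by
  intro k
  induction k with
  | zero => simp
  | succ k ih => simp [List.replicate_succ, ih]

lemma altRuns_replicate_append (prev : Int) (m : Nat) (hm : 0 < m) (t : List Int)
    (ht : t.takeWhile (· == prev) = []) :
    altRuns (List.replicate m prev ++ t)
      = (if m > 1 then [List.replicate m prev] else []) ++ altRuns (t.dropWhile (· == prev)) := by
  obtain ⟨k, rfl⟩ : ∃ k, m = k + 1 := ⟨m - 1, by omega⟩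
  rw [List.replicate_succ, List.cons_append, altRuns_cons]
  simp only [takeWhile_replicate_append, dropWhile_replicate_append, ht, List.append_nil]
  have hlen : (prev :: List.replicate k prev).length = k + 1 := by simp
  by_cases h : k + 1 > 1
  · simp [hlen, h]
  · simp [hlen, h]

lemma loopA_eq_runs :
    ∀ (suf : List Int) (prev : Int) (rep : List (List Int)) (m : Nat), 0 < m →
      flushA (loopA suf prev (rep, List.replicate m prev))
      = rep ++ altRuns (List.replicate m prev ++ suf) := by
  intro suf
  induction suf with
  | nil =>
    intro prev rep m hm
    have h := altRuns_replicate_append prev m hm [] (by simp)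
    simp only [List.append_nil, List.dropWhile_nil, altRuns_nil] at h ⊢
    rw [h, flushA]
    simp only [loopA, List.length_replicate]
    by_cases hgt : m > 1 <;> simp [hgt]
  | cons x rest ih =>
    intro prev rep m hm
    by_cases hx : x = prev
    · subst hx
      simp only [loopA]
      rw [if_true, ← List.replicate_succ']
      rw [ih x rep (m + 1) (by omega)]
      congr 1
      rw [List.replicate_succ', List.append_assoc]
      rfl
    · simp only [loopA, if_neg hx]
      have h1 := ih x (if (List.replicate m prev).length > 1
          then rep ++ [List.replicate m prev] else rep) 1 (by omega)
      simp only [List.replicate_one] at h1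
      rw [h1]
      rw [altRuns_replicate_append prev m hm (x :: rest) (by simp [hx]),
          List.dropWhile_cons]
      simp only [List.length_replicate, beq_iff_eq, hx, if_false]
      by_cases h : m > 1 <;> simp [h, List.append_assoc]

-- ===== VERDICT (by name: the statement is the Claim_ definition above) =====
theorem find_repeated_sequences_spec : Claim_equal_find_repeated_sequences := by
  intro arr _
  unfold Spec_find_repeated_sequences find_repeated_sequences find_repeated_sequences_alt
  match arr with
  | [] => simp
  | a0 :: rest =>
    have hf := fold_eq_loopA (a0 :: rest) rest [a0] (by simp) ([], [a0]) (by simp)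
    have hr := loopA_eq_runs rest ([a0].getLast (by simp)) [] 1 (by omega)
    simp only [List.getLast_singleton, List.replicate_one, List.singleton_append,
      List.nil_append, flushA] at hr
    simp only [PySem.List.len_eq, List.length_singleton, Nat.cast_one] at hf ⊢
    rw [hf]
    exact hr
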